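-- pv_equiv track=rewrite | github.com/tmatens/compose-lint | src/compose_lint/rules/CL0013_sensitive_mount.py | _is_sensitive
-- ===== SOURCE A (Python) =====
-- _SENSITIVE_PATHS = (
--     "/etc",
--     "/proc",
--     "/sys",
--     "/boot",
--     "/root",
--     "/var/lib/docker",
--     "/var/run",
--     "/home",
-- )
--
-- def _is_sensitive(host_path: str) -> str | None:
--     """Return the sensitive prefix if host_path starts with one, else None.
--
--     Returns "/" for a literal root mount — the most sensitive path possible.
--     """
--     if host_path == "/":
--         return "/"
--     normalized = host_path.rstrip("/")
--     if normalized == "":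
--         return "/"
--     for sensitive in _SENSITIVE_PATHS:
--         if normalized == sensitive or normalized.startswith(sensitive + "/"):
--             return sensitive
--     return None
-- ===== SOURCE B (Python) =====
-- _SENSITIVE_PATHS = (
--     "/etc",
--     "/proc",
--     "/sys",
--     "/boot",
--     "/root",
--     "/var/lib/docker",
--     "/var/run",
--     "/home",
-- )
--
-- def _is_sensitive(host_path):
--     if host_path == "/":
--         return "/"
--     normalized = host_path.rstrip("/")
--     if normalized == "":
--         return "/"
--     sensitive = set(_SENSITIVE_PATHS)
--     parts = normalized.split("/")
--     prefix = ""
--     for i, part in enumerate(parts):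
--         prefix = part if i == 0 else prefix + "/" + part
--         if prefix in sensitive:
--             return prefix
--     return None
-- ===== Notes on version B (the rewrite author's own statement) =====
-- stated objective: alternative
-- what changed: Instead of scanning the fixed tuple of sensitive paths with startswith tests, B splits the normalized path on the separator and enumerates its own cumulative ancestor prefixes, returning the first one found in a set built from the sensitive paths.
import Mathlib
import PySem

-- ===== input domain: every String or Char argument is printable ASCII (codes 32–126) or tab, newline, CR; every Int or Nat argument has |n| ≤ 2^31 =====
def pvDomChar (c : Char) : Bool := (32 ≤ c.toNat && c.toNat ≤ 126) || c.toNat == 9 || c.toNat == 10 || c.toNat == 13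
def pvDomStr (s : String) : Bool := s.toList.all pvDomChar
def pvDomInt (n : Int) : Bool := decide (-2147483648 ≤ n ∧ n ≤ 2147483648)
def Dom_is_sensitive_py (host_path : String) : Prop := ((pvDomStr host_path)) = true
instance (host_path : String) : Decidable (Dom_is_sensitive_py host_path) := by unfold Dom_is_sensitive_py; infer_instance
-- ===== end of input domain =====

-- B enumerates the normalized path's own cumulative '/'-prefixes and looks each up in a set of the
-- sensitive paths, instead of A's scan of the fixed tuple with startswith tests; same return value.

-- shared constant: the module-level _SENSITIVE_PATHS tuple, as lists of chars
def pvSensC : List (List Char) :=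
  ["/etc".toList, "/proc".toList, "/sys".toList, "/boot".toList, "/root".toList,
   "/var/lib/docker".toList, "/var/run".toList, "/home".toList]

-- hand port of host_path.rstrip("/"): drop all trailing '/' characters (exact: rstrip with an
-- explicit chars argument removes exactly the trailing characters drawn from that set)
def pvRstripSlash (s : List Char) : List Char := (s.reverse.dropWhile (· == '/')).reverse

-- ===== PORT A =====
def is_sensitive_py (host_path : String) : Option String :=
  if host_path == "/" then some "/"
  else
    let normalized := pvRstripSlash host_path.toList
    if normalized == [] then some "/"
    else
      (pvSensC.find? (fun sensitive =>
        normalized == sensitive || PySem.Chars.startswith normalized (sensitive ++ ['/']))).map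
        (fun s => String.ofList s)

-- ===== PORT B =====
-- the loop 'for i, part in enumerate(parts): prefix = part if i == 0 else prefix + "/" + part; …'
def pvCumScan (sens : PySem.Set (List Char)) (first : Bool) (pre : List Char) :
    List (List Char) → Option (List Char)
  | [] => none
  | p :: ps =>
      let pre' := if first then p else pre ++ '/' :: p
      if PySem.Set.contains sens pre' then some pre' else pvCumScan sens false pre' ps

def is_sensitive_py_alt (host_path : String) : Option String :=
  if host_path == "/" then some "/"
  else
    let normalized := pvRstripSlash host_path.toList
    if normalized == [] then some "/"
    else
      let sensitive : PySem.Set (List Char) := PySem.Set.ofList pvSensC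
      let parts := normalized.splitOn '/'
      (pvCumScan sensitive true [] parts).map (fun s => String.ofList s)

-- ===== PRECONDITION & SPEC =====
def Spec_is_sensitive_py (host_path : String) (out : Option String) : Prop := out = is_sensitive_py_alt host_path
instance (host_path : String) (out : Option String) : Decidable (Spec_is_sensitive_py host_path out) := by unfold Spec_is_sensitive_py; infer_instance

-- ===== CLAIM (what is proved, stated in full; the proofs are below) =====
def Claim_equal_is_sensitive_py : Prop := ∀ (host_path : String), Dom_is_sensitive_py host_path → Spec_is_sensitive_py host_path (is_sensitive_py host_path)

-- ===== LEMMAS AND PROOFS =====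

-- the list of cumulative prefixes B's scan visits, in order
def pvCums : List (List Char) → List (List Char)
  | [] => []
  | p :: ps => p :: (pvCums ps).map (fun q => p ++ '/' :: q)

lemma pvCumScan_false_eq (sens : PySem.Set (List Char)) (ps : List (List Char)) :
    ∀ pre, pvCumScan sens false pre ps =
      ((pvCums ps).map (fun q => pre ++ '/' :: q)).find? (fun q => PySem.Set.contains sens q) := by
  induction ps with
  | nil => intro pre; simp [pvCumScan, pvCums]
  | cons p ps ih =>
    intro pre
    show (if PySem.Set.contains sens (pre ++ '/' :: p) = true then some (pre ++ '/' :: p)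
          else pvCumScan sens false (pre ++ '/' :: p) ps)
        = ((pvCums (p :: ps)).map (fun q => pre ++ '/' :: q)).find?
            (fun q => PySem.Set.contains sens q)
    simp only [pvCums, List.map_cons, List.find?_cons]
    cases PySem.Set.contains sens (pre ++ '/' :: p)
    · simp only [if_false, Bool.false_eq_true, ih, List.map_map]
      simp [Function.comp_def]
    · simp

lemma pvCumScan_true_eq (sens : PySem.Set (List Char)) (ps : List (List Char)) (pre : List Char) :
    pvCumScan sens true pre ps = (pvCums ps).find? (fun q => PySem.Set.contains sens q) := by
  cases ps with
  | nil => rfl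
  | cons p ps =>
    show (if PySem.Set.contains sens p = true then some p else pvCumScan sens false p ps)
        = (pvCums (p :: ps)).find? (fun q => PySem.Set.contains sens q)
    simp only [pvCums, List.find?_cons]
    cases PySem.Set.contains sens p
    · simp only [if_false, Bool.false_eq_true]
      rw [pvCumScan_false_eq]
    · simp

-- cums of modifyHead on a nonempty list
lemma pvCums_modifyHead (c : Char) (L : List (List Char)) (hL : L ≠ []) :
    pvCums (L.modifyHead (fun l => c :: l)) = (pvCums L).map (fun q => c :: q) := by
  cases L with
  | nil => exact absurd rfl hL
  | cons h t =>
    simp only [List.modifyHead, pvCums, List.map_cons, List.map_map]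
    simp [Function.comp_def]

-- the key characterization: q is a visited cumulative prefix of n iff q = n or q ++ "/" is a prefix of n
lemma mem_pvCums_iff (n : List Char) :
    ∀ q, q ∈ pvCums (n.splitOn '/') ↔ (n = q ∨ q ++ ['/'] <+: n) := by
  induction n with
  | nil =>
    intro q
    have h0 : ([] : List Char).splitOn '/' = [[]] := by rfl
    rw [h0]
    constructor
    · intro h
      simp [pvCums] at h
      exact Or.inl h.symm
    · rintro (rfl | h)
      · simp [pvCums]
      · exact absurd h.length_le (by simp)
  | cons c n' ih =>
    intro q
    by_cases hc : c = '/'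
    · subst hc
      have hsplit : ('/' :: n').splitOn '/' = [] :: n'.splitOn '/' := by
        simp [List.splitOn, List.splitOnP_cons]
      rw [hsplit]
      simp only [pvCums, List.mem_cons, List.mem_map, List.nil_append]
      constructor
      · rintro (rfl | ⟨q', hq', rfl⟩)
        · exact Or.inr ⟨n', rfl⟩
        · rcases (ih q').1 hq' with h | h
          · exact Or.inl (by rw [h])
          · exact Or.inr (by simpa [List.cons_prefix_cons] using h)
      · rintro (rfl | h)
        · exact Or.inr ⟨n', (ih n').2 (Or.inl rfl), rfl⟩
        · cases q with
          | nil => exact Or.inl rfl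
          | cons a q' =>
            rw [List.cons_append, List.cons_prefix_cons] at h
            obtain ⟨rfl, h⟩ := h
            exact Or.inr ⟨q', (ih q').2 (Or.inr h), rfl⟩
    · have hsplit : (c :: n').splitOn '/' = (n'.splitOn '/').modifyHead (fun l => c :: l) := by
        simp [List.splitOn, List.splitOnP_cons, hc]
      have hne : n'.splitOn '/' ≠ [] := by
        unfold List.splitOn; exact List.splitOnP_ne_nil _ n'
      rw [hsplit, pvCums_modifyHead c _ hne]
      simp only [List.mem_map]
      constructor
      · rintro ⟨q', hq', rfl⟩
        rcases (ih q').1 hq' with h | h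
        · exact Or.inl (by rw [h])
        · exact Or.inr (by simpa [List.cons_prefix_cons] using h)
      · rintro (rfl | h)
        · exact ⟨n', (ih n').2 (Or.inl rfl), rfl⟩
        · cases q with
          | nil =>
            exfalso
            rw [List.nil_append] at h
            rw [List.cons_prefix_cons] at h
            exact hc h.1.symm
          | cons a q' =>
            rw [List.cons_append, List.cons_prefix_cons] at h
            obtain ⟨rfl, h⟩ := h
            exact ⟨q', (ih q').2 (Or.inr h), rfl⟩

-- A's match condition as a Prop
lemma predA_iff (n s : List Char) :
    (n == s || PySem.Chars.startswith n (s ++ ['/'])) = true ↔ (n = s ∨ s ++ ['/'] <+: n) := by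
  simp [PySem.Chars.startswith_iff, beq_iff_eq]

-- no sensitive path extended by '/' is a prefix of another sensitive path
lemma sens_no_slash_prefix :
    ∀ s ∈ pvSensC, ∀ t ∈ pvSensC, ¬ (s ++ ['/'] <+: t) := by decide

-- at most one sensitive path can match n
lemma sens_unique (n s t : List Char) (hs : s ∈ pvSensC) (ht : t ∈ pvSensC)
    (hPs : n = s ∨ s ++ ['/'] <+: n) (hPt : n = t ∨ t ++ ['/'] <+: n) : s = t := by
  have hps : s <+: n := by
    rcases hPs with rfl | h
    · exact List.prefix_refl _
    · exact ((List.prefix_append s ['/']).trans h)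
  have hpt : t <+: n := by
    rcases hPt with rfl | h
    · exact List.prefix_refl _
    · exact ((List.prefix_append t ['/']).trans h)
  by_contra hne
  -- wlog via total order on lengths
  rcases le_or_gt s.length t.length with hle | hgt
  · -- s is a (weak) prefix of t
    rcases hPs with rfl | h
    · exact hne (List.IsPrefix.eq_of_length_le hpt hle).symm
    · have hlen : s.length + 1 ≤ t.length := by
        rcases lt_or_eq_of_le hle with hlt | heq
        · omega
        · exact absurd (List.IsPrefix.eq_of_length (List.prefix_of_prefix_length_le hps hpt hle) heq) hne
      have : s ++ ['/'] <+: t := by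
        apply List.prefix_of_prefix_length_le h hpt
        simpa using hlen
      exact sens_no_slash_prefix s hs t ht this
  · rcases hPt with rfl | h
    · exact hne (List.IsPrefix.eq_of_length_le hps (le_of_lt hgt))
    · have : t ++ ['/'] <+: s := by
        apply List.prefix_of_prefix_length_le h hps
        simp; omega
      exact sens_no_slash_prefix t ht s hs this
  
lemma contains_sens_iff (q : List Char) :
    PySem.Set.contains (PySem.Set.ofList pvSensC) q = true ↔ q ∈ pvSensC := by
  unfold PySem.Set.contains
  rw [List.contains_iff_mem]
  exact PySem.Set.mem_ofList _ _

-- the central equality of the two scans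
lemma scan_eq_find (n : List Char) :
    pvCumScan (PySem.Set.ofList pvSensC) true [] (n.splitOn '/') =
      pvSensC.find? (fun sensitive =>
        n == sensitive || PySem.Chars.startswith n (sensitive ++ ['/'])) := by
  rw [pvCumScan_true_eq]
  cases hA : pvSensC.find? (fun s => n == s || PySem.Chars.startswith n (s ++ ['/'])) with
  | none =>
    rw [List.find?_eq_none] at hA ⊢
    intro q hq hcq
    have hqS : q ∈ pvSensC := (contains_sens_iff q).1 hcq
    have hPq := (mem_pvCums_iff n q).1 hq
    exact hA q hqS ((predA_iff n q).2 hPq)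
  | some s =>
    have hsS : s ∈ pvSensC := List.mem_of_find?_eq_some hA
    have hAs : (n == s || PySem.Chars.startswith n (s ++ ['/'])) = true := by
      simpa using List.find?_some hA
    have hPs : n = s ∨ s ++ ['/'] <+: n := (predA_iff n s).1 hAs
    have hmem : s ∈ pvCums (n.splitOn '/') := (mem_pvCums_iff n s).2 hPs
    have hsome : (pvCums (n.splitOn '/')).find?
        (fun q => PySem.Set.contains (PySem.Set.ofList pvSensC) q) |>.isSome := by
      rw [List.find?_isSome]
      exact ⟨s, hmem, (contains_sens_iff s).2 hsS⟩
    cases hB : (pvCums (n.splitOn '/')).find?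
        (fun q => PySem.Set.contains (PySem.Set.ofList pvSensC) q) with
    | none => rw [hB] at hsome; simp at hsome
    | some t =>
      have htS : t ∈ pvSensC := (contains_sens_iff t).1 (by simpa using List.find?_some hB)
      have htc : t ∈ pvCums (n.splitOn '/') := List.mem_of_find?_eq_some hB
      have hPt := (mem_pvCums_iff n t).1 htc
      rw [sens_unique n t s htS hsS hPt hPs]

-- ===== VERDICT (by name: the statement is the Claim_ definition above) =====
theorem is_sensitive_py_spec : Claim_equal_is_sensitive_py := by
  intro host_path _
  unfold Spec_is_sensitive_py is_sensitive_py is_sensitive_py_alt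
  by_cases h1 : host_path == "/"
  · simp [h1]
  · simp only [h1, Bool.false_eq_true, if_false]
    by_cases h2 : pvRstripSlash host_path.toList == []
    · simp [h2]
    · simp only [h2, Bool.false_eq_true, if_false]
      rw [scan_eq_find]
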